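-- pv_equiv track=rewrite | github.com/programmersGC/Algo | 채은/Level 1/문자열 다루기 기본.py | solution
-- ===== SOURCE A (Python) =====
-- def solution(s):
--     llist = []
--     for i in s:
--         llist.append(i)
--
--     AL = []
--     alph = ['a','b','c','d','e','f','g','h','i','j','k','l','m','n','o','p','q','r','s','t','u','v','w','x','y','z']
--     for j in alph:
--         AL.append(j.upper())
--
--     if len(s) == 4 or len(s) == 6:
--         for i in alph:
--             if i in llist:
--                 return False
--             else:
--                 for k in AL:
--                     if k in llist:
--                         return False
--                     else: True
--     else:
--         return False
--
--     return True
-- ===== SOURCE B (Python) =====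
-- def solution(s):
--     if len(s) not in (4, 6):
--         return False
--     return all(not c.isalpha() for c in s)
-- ===== Notes on version B (the rewrite author's own statement) =====
-- stated objective: faster
-- what changed: A loops over all 52 alphabet letters (with a nested uppercase scan) doing a list membership scan of the input for each; B makes a single pass over the input's characters testing each for being a letter.
import Mathlib
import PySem

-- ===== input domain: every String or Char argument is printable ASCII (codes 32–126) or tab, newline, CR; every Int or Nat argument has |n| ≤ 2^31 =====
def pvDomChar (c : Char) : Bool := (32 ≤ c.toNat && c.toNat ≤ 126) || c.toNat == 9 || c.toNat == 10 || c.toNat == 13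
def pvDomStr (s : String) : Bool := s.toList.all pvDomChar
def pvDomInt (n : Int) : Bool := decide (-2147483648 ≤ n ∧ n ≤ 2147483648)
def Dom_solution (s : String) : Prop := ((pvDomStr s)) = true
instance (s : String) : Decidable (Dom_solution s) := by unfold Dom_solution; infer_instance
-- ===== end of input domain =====

-- B is a single pass over the input testing each character for being an ASCII letter,
-- instead of A's loop over the 52-letter alphabet testing membership in the input; same values.

-- ===== PORT A =====
def pvAlph : List Char :=
  ['a','b','c','d','e','f','g','h','i','j','k','l','m',
   'n','o','p','q','r','s','t','u','v','w','x','y','z']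

-- inner 'for k in AL' loop: returns false as soon as some k is in llist, true if it finishes
def pvInnerA (al : List Char) (llist : List Char) : Bool :=
  match al with
  | [] => true
  | k :: r => if llist.contains k then false else pvInnerA r llist

-- outer 'for i in alph' loop
def pvOuterA (l : List Char) (llist al : List Char) : Bool :=
  match l with
  | [] => true
  | i :: r =>
    if llist.contains i then false
    else if pvInnerA al llist then pvOuterA r llist al else false

def solution (s : String) : Bool :=
  let llist : List Char := s.toList
  let al : List Char := pvAlph.map PySem.Chars.upperChar
  if PySem.Str.len s = 4 ∨ PySem.Str.len s = 6 then
    pvOuterA pvAlph llist al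
  else
    false

-- ===== PORT B =====
def solution_alt (s : String) : Bool :=
  if PySem.Str.len s = 4 ∨ PySem.Str.len s = 6 then
    s.toList.all (fun c => !PySem.Chars.isalpha c)
  else
    false

-- ===== PRECONDITION & SPEC =====
def Spec_solution (s : String) (out : Bool) : Prop := out = solution_alt s
instance (s : String) (out : Bool) : Decidable (Spec_solution s out) := by unfold Spec_solution; infer_instance

-- ===== CLAIM (what is proved, stated in full; the proofs are below) =====
def Claim_equal_solution : Prop := ∀ (s : String), Dom_solution s → Spec_solution s (solution s)

-- ===== LEMMAS AND PROOFS =====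

-- all 52 ASCII letters, lowercase then uppercase, as A's loops see them
def pvLetters : List Char := pvAlph ++ pvAlph.map PySem.Chars.upperChar

lemma pvInnerA_eq (al llist : List Char) : pvInnerA al llist = !al.any llist.contains := by
  induction al with
  | nil => rfl
  | cons k r ih => simp [pvInnerA, ih]

lemma pvOuterA_eq (l llist al : List Char) :
    pvOuterA l llist al = (!l.any llist.contains && (l.isEmpty || !al.any llist.contains)) := by
  induction l with
  | nil => rfl
  | cons i r ih =>
    by_cases hi : i ∈ llist
    · simp [pvOuterA, hi]
    · by_cases hin : al.any llist.contains
      · simp [pvOuterA, pvInnerA_eq, hi, hin]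
      · simp [pvOuterA, pvInnerA_eq, hi, hin, ih]

lemma all_not_any (p : Char → Bool) (l : List Char) :
    (!l.any p) = l.all (fun c => !p c) := by
  induction l with
  | nil => rfl
  | cons c t ih => simp [List.any_cons, List.all_cons, ← ih]

lemma any_contains_comm (L cs : List Char) : L.any cs.contains = cs.any L.contains := by
  rw [Bool.eq_iff_iff]
  simp only [List.any_eq_true, List.contains_iff_mem]
  exact ⟨fun ⟨x, h1, h2⟩ => ⟨x, h2, h1⟩, fun ⟨x, h1, h2⟩ => ⟨x, h2, h1⟩⟩

lemma contains_eq_isalpha (c : Char) : pvLetters.contains c = PySem.Chars.isalpha c := by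
  rw [Bool.eq_iff_iff, List.contains_iff_mem]
  constructor
  · intro h
    have hall : pvLetters.all PySem.Chars.isalpha = true := by decide
    exact List.all_eq_true.mp hall c h
  · intro h
    have hb : (97 ≤ c.toNat ∧ c.toNat ≤ 122) ∨ (65 ≤ c.toNat ∧ c.toNat ≤ 90) := by
      simp only [PySem.Chars.isalpha, PySem.Chars.isupper, PySem.Chars.islower,
        Bool.or_eq_true, Bool.and_eq_true, decide_eq_true_eq, Char.le_def] at h
      rcases h with ⟨h1, h2⟩ | ⟨h1, h2⟩
      · right
        exact ⟨UInt32.le_iff_toNat_le.mp h1, UInt32.le_iff_toNat_le.mp h2⟩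
      · left
        exact ⟨UInt32.le_iff_toNat_le.mp h1, UInt32.le_iff_toNat_le.mp h2⟩
    have hc : c = Char.ofNat c.toNat := (Char.ofNat_toNat c).symm
    rw [hc]
    rcases hb with ⟨h1, h2⟩ | ⟨h1, h2⟩ <;>
      · interval_cases h : c.toNat <;> decide

lemma loop_eq_all (llist : List Char) :
    pvOuterA pvAlph llist (pvAlph.map PySem.Chars.upperChar)
      = llist.all (fun c => !PySem.Chars.isalpha c) := by
  rw [pvOuterA_eq]
  rw [show pvAlph.isEmpty = false from rfl, Bool.false_or, ← Bool.not_or, ← List.any_append]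
  rw [show pvAlph ++ pvAlph.map PySem.Chars.upperChar = pvLetters from rfl, any_contains_comm]
  rw [show pvLetters.contains = PySem.Chars.isalpha from funext contains_eq_isalpha]
  exact all_not_any _ _

-- ===== VERDICT (by name: the statement is the Claim_ definition above) =====
theorem solution_spec : Claim_equal_solution := by
  intro s _
  unfold Spec_solution solution solution_alt
  by_cases h : PySem.Str.len s = 4 ∨ PySem.Str.len s = 6
  · simp only [h, if_pos, loop_eq_all]
  · simp only [h, if_false]
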